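-- pv_equiv track=rewrite | github.com/raresboza/thesis_lost_in_translation | evaluation_scripts/gini_coefficient.py | aggregate_item_exposures_to_groups
-- ===== SOURCE A (Python) =====
-- def aggregate_item_exposures_to_groups(item_exposure, item_languages):
--     """
--     Aggregate item exposures to group exposures.
--
--     Parameters:
--     - item_exposure: Dictionary {item: exposure_frequency}
--     - item_languages: Dictionary {item: group}
--
--     Returns:
--     - group_exposure: Dictionary {group: total_exposure}
--     """
--     group_exposure = {}
--
--     for item, exposure in item_exposure.items():
--         group = item_languages[item]
--         if group not in group_exposure:
--             group_exposure[group] = 0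
--         group_exposure[group] += exposure
--
--     return group_exposure
-- ===== SOURCE B (Python) =====
-- def aggregate_item_exposures_to_groups(item_exposure, item_languages):
--     """
--     Aggregate item exposures to group exposures.
--
--     Two-pass alternative: first collect the distinct groups in order of first
--     appearance, then sum each group's exposures with a dedicated pass.
--     """
--     groups = []
--     for item in item_exposure:
--         g = item_languages[item]
--         if g not in groups:
--             groups.append(g)
--     return {g: sum(e for i, e in item_exposure.items()
--                    if item_languages[i] == g)
--             for g in groups}
-- ===== Notes on version B (the rewrite author's own statement) =====
-- stated objective: alternative
-- what changed: B first collects the distinct groups in first-appearance order, then computes each group's total in a separate summing pass over the items, instead of A's single pass maintaining a running dict of accumulators.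
import Mathlib
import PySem

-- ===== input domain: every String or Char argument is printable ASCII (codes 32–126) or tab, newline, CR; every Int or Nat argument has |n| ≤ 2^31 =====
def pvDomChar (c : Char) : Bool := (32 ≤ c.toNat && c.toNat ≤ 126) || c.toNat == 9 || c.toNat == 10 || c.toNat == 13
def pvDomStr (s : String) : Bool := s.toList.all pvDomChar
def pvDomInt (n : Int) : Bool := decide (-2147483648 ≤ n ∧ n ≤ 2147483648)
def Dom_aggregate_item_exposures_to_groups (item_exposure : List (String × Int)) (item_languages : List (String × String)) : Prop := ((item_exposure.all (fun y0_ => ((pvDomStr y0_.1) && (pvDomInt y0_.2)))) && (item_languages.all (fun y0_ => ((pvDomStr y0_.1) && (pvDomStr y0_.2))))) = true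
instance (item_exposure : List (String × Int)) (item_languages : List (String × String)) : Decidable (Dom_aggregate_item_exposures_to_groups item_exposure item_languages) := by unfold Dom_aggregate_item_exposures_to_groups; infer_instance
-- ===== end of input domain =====

-- B replaces A's single-pass running dict by two passes (collect distinct groups, then sum
-- each group's exposures); same result, same asymptotic cost class for few groups (objective: alternative).

-- ===== PORT A =====
-- the incremental dict accumulation of A, step for step
def aggregate_item_exposures_to_groups (item_exposure : List (String × Int)) (item_languages : List (String × String)) : List (String × Int) :=
  (item_exposure.foldl
    (fun group_exposure p =>
      match (PySem.Dict.mk item_languages).get? p.1 with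
      | some group =>
          -- if group not in group_exposure: group_exposure[group] = 0
          let d := if group_exposure.contains group then group_exposure
                   else group_exposure.insert group 0
          -- group_exposure[group] += exposure
          d.insert group (d.getD group 0 + p.2)
      | none => group_exposure)   -- KeyError: excluded by Pre_
    PySem.Dict.empty).items

-- ===== PORT B =====
-- B, pass 1: distinct groups in first-appearance order
def pvGroupsB (item_exposure : List (String × Int)) (item_languages : List (String × String)) : List String :=
  item_exposure.foldl
    (fun groups p =>
      match (PySem.Dict.mk item_languages).get? p.1 with
      | some g => if groups.contains g then groups else groups ++ [g]
      | none => groups)   -- KeyError: excluded by Pre_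
    []

def aggregate_item_exposures_to_groups_alt (item_exposure : List (String × Int)) (item_languages : List (String × String)) : List (String × Int) :=
  (pvGroupsB item_exposure item_languages).map
    (fun g => (g, item_exposure.foldl
        (fun s p => if (PySem.Dict.mk item_languages).get? p.1 == some g then s + p.2 else s)
        0))

-- ===== PRECONDITION & SPEC =====
-- Pre_ excludes exactly the inputs on which Python A raises KeyError: an item of
-- item_exposure missing from item_languages (B raises the same KeyError there).
def Pre_aggregate_item_exposures_to_groups (item_exposure : List (String × Int)) (item_languages : List (String × String)) : Prop :=
  ∀ p ∈ item_exposure, p.1 ∈ item_languages.map Prod.fst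
instance (item_exposure : List (String × Int)) (item_languages : List (String × String)) : Decidable (Pre_aggregate_item_exposures_to_groups item_exposure item_languages) := by unfold Pre_aggregate_item_exposures_to_groups; infer_instance
def pvWitness_aggregate_item_exposures_to_groups : (List (String × Int)) × (List (String × String)) :=
  ([("i1", 2), ("i2", 3), ("i3", -1)], [("i1", "en"), ("i2", "ro"), ("i3", "en")])

def Spec_aggregate_item_exposures_to_groups (item_exposure : List (String × Int)) (item_languages : List (String × String)) (out : List (String × Int)) : Prop := out = aggregate_item_exposures_to_groups_alt item_exposure item_languages
instance (item_exposure : List (String × Int)) (item_languages : List (String × String)) (out : List (String × Int)) : Decidable (Spec_aggregate_item_exposures_to_groups item_exposure item_languages out) := by unfold Spec_aggregate_item_exposures_to_groups; infer_instance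

-- ===== CLAIM (what is proved, stated in full; the proofs are below) =====
def Claim_equal_aggregate_item_exposures_to_groups : Prop := ∀ (item_exposure : List (String × Int)) (item_languages : List (String × String)), Dom_aggregate_item_exposures_to_groups item_exposure item_languages → Pre_aggregate_item_exposures_to_groups item_exposure item_languages → Spec_aggregate_item_exposures_to_groups item_exposure item_languages (aggregate_item_exposures_to_groups item_exposure item_languages)

-- ===== LEMMAS AND PROOFS =====

-- the group of an item, total on Pre_ (getD "" is never used there)
def pvGrp (item_languages : List (String × String)) (p : String × Int) : String :=
  ((PySem.Dict.mk item_languages).get? p.1).getD ""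

-- running-sum invariant for A's (simplified) dict loop
theorem pvGetD_foldl_insert_add (il : List (String × String)) (l : List (String × Int))
    (d : PySem.Dict String Int) (gr : String) :
    (l.foldl (fun d p => d.insert (pvGrp il p) (d.getD (pvGrp il p) 0 + p.2)) d).getD gr 0
      = d.getD gr 0 + ((l.filter (fun p => pvGrp il p == gr)).map (·.2)).sum := by
  induction l generalizing d with
  | nil => simp
  | cons p t ih =>
      simp only [List.foldl_cons, ih, List.filter_cons]
      by_cases h : pvGrp il p = gr
      · simp [h, PySem.Dict.getD_insert_self]; ring
      · have hb : (pvGrp il p == gr) = false := by simp [h]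
        rw [PySem.Dict.getD_insert, if_neg (fun e => h e.symm)]
        simp [hb]

theorem pvGet_some (il : List (String × String)) (p : String × Int)
    (h : p.1 ∈ il.map Prod.fst) :
    (PySem.Dict.mk il).get? p.1 = some (pvGrp il p) := by
  have hne : (PySem.Dict.mk il).get? p.1 ≠ none := by
    intro hnone
    rw [PySem.Dict.get?_eq_none_iff_not_mem_keys] at hnone
    exact hnone (by simpa using h)
  obtain ⟨v, hv⟩ := Option.ne_none_iff_exists'.mp hne
  rw [hv]; simp [pvGrp, hv]

def pvStepA (il : List (String × String)) (group_exposure : PySem.Dict String Int) (p : String × Int) : PySem.Dict String Int :=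
  match (PySem.Dict.mk il).get? p.1 with
  | some group =>
      let d := if group_exposure.contains group then group_exposure
               else group_exposure.insert group 0
      d.insert group (d.getD group 0 + p.2)
  | none => group_exposure

def pvClean (il : List (String × String)) (d : PySem.Dict String Int) (p : String × Int) : PySem.Dict String Int :=
  d.insert (pvGrp il p) (d.getD (pvGrp il p) 0 + p.2)

theorem pvStepA_eq (il : List (String × String)) (l : List (String × Int))
    (h : ∀ p ∈ l, p.1 ∈ il.map Prod.fst) (d : PySem.Dict String Int) :
    l.foldl (pvStepA il) d = l.foldl (pvClean il) d := by
  induction l generalizing d with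
  | nil => rfl
  | cons p t ih =>
      have hhd : pvStepA il d p = pvClean il d p := by
        unfold pvStepA pvClean
        rw [pvGet_some il p (h p (List.mem_cons_self ..))]
        by_cases hc : d.contains (pvGrp il p)
        · simp [hc]
        · have h0 : d.getD (pvGrp il p) 0 = 0 :=
            PySem.Dict.getD_of_not_contains d 0 (by simpa using hc)
          simp [hc, PySem.Dict.insert_insert_self, PySem.Dict.getD_insert_self, h0]
      simp only [List.foldl_cons, hhd]
      exact ih (fun q hq => h q (List.mem_cons_of_mem _ hq)) _

-- A's result in closed form
theorem pvA_eq (ie : List (String × Int)) (il : List (String × String))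
    (h : Pre_aggregate_item_exposures_to_groups ie il) :
    aggregate_item_exposures_to_groups ie il
      = (PySem.List.dedup (ie.map (pvGrp il))).map
          (fun gr => (gr, ((ie.filter (fun p => pvGrp il p == gr)).map (·.2)).sum)) := by
  have hA : aggregate_item_exposures_to_groups ie il = (ie.foldl (pvStepA il) PySem.Dict.empty).items := rfl
  rw [hA, pvStepA_eq il ie h]
  have hnd : (ie.foldl (pvClean il) PySem.Dict.empty).keys.Nodup := by
    unfold pvClean
    exact PySem.Dict.nodup_keys_foldl_insert_key ie (pvGrp il) _ _ (by simp)
  rw [PySem.Dict.items_eq_map_keys _ hnd 0]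
  have hkeys : (ie.foldl (pvClean il) PySem.Dict.empty).keys = PySem.List.dedup (ie.map (pvGrp il)) := by
    unfold pvClean
    rw [PySem.Dict.keys_foldl_insert_key]
    simp [PySem.Dict.keys_empty, PySem.Set.update_nil_left]
  rw [hkeys]
  apply List.map_congr_left
  intro gr _
  have := pvGetD_foldl_insert_add il ie PySem.Dict.empty gr
  unfold pvClean
  rw [this]
  simp

def pvStepG (il : List (String × String)) (groups : List String) (p : String × Int) : List String :=
  match (PySem.Dict.mk il).get? p.1 with
  | some g => if groups.contains g then groups else groups ++ [g]
  | none => groups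

theorem pvStepG_eq (il : List (String × String)) (l : List (String × Int))
    (h : ∀ p ∈ l, p.1 ∈ il.map Prod.fst) (acc : List String) :
    l.foldl (pvStepG il) acc = l.foldl (fun s p => PySem.Set.add s (pvGrp il p)) acc := by
  induction l generalizing acc with
  | nil => rfl
  | cons p t ih =>
      have hhd : pvStepG il acc p = PySem.Set.add acc (pvGrp il p) := by
        unfold pvStepG
        rw [pvGet_some il p (h p (List.mem_cons_self ..))]
        rfl
      simp only [List.foldl_cons, hhd]
      exact ih (fun q hq => h q (List.mem_cons_of_mem _ hq)) _

theorem pvSum_eq (il : List (String × String)) (l : List (String × Int))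
    (h : ∀ p ∈ l, p.1 ∈ il.map Prod.fst) (gr : String) (s : Int) :
    l.foldl (fun s p => if (PySem.Dict.mk il).get? p.1 == some gr then s + p.2 else s) s
      = l.foldl (fun s p => if pvGrp il p == gr then s + p.2 else s) s := by
  induction l generalizing s with
  | nil => rfl
  | cons p t ih =>
      have hhd : ((PySem.Dict.mk il).get? p.1 == some gr) = (pvGrp il p == gr) := by
        rw [pvGet_some il p (h p (List.mem_cons_self ..))]
        simp
      simp only [List.foldl_cons, hhd]
      exact ih (fun q hq => h q (List.mem_cons_of_mem _ hq)) _

-- B's result in the same closed form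
theorem pvB_eq (ie : List (String × Int)) (il : List (String × String))
    (h : Pre_aggregate_item_exposures_to_groups ie il) :
    aggregate_item_exposures_to_groups_alt ie il
      = (PySem.List.dedup (ie.map (pvGrp il))).map
          (fun gr => (gr, ((ie.filter (fun p => pvGrp il p == gr)).map (·.2)).sum)) := by
  have hG : pvGroupsB ie il = ie.foldl (pvStepG il) [] := rfl
  have hB : aggregate_item_exposures_to_groups_alt ie il
      = (pvGroupsB ie il).map (fun g => (g, ie.foldl
          (fun s p => if (PySem.Dict.mk il).get? p.1 == some g then s + p.2 else s) 0)) := rfl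
  rw [hB, hG, pvStepG_eq il ie h]
  rw [← PySem.Set.update_map_eq_foldl_add, PySem.Set.update_nil_left]
  have hded : PySem.Set.ofList (ie.map (pvGrp il)) = PySem.List.dedup (ie.map (pvGrp il)) := by
    simp
  rw [hded]
  apply List.map_congr_left
  intro gr _
  rw [pvSum_eq il ie h gr 0]
  rw [PySem.List.foldl_ite_eq_foldl_filter (p := fun p => pvGrp il p == gr)]
  have hsum := PySem.List.foldl_add (ie.filter (fun p => pvGrp il p == gr)) (fun p => p.2) 0
  simp only [zero_add] at hsum
  simpa using hsum

-- ===== VERDICT (by name: the statement is the Claim_ definition above) =====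
theorem aggregate_item_exposures_to_groups_spec : Claim_equal_aggregate_item_exposures_to_groups := by
  intro ie il _ hpre
  unfold Spec_aggregate_item_exposures_to_groups
  rw [pvA_eq ie il hpre, pvB_eq ie il hpre]
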